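-- pv_equiv track=rewrite | github.com/Abrish-21/100DaysOfCodefroces | A_Vanya_and_Fence.py | minWidth
-- ===== SOURCE A (Python) =====
-- def minWidth(arr, height):
--     width = 0
--     for i in arr:
--         if i <= height:
--             width +=1
--         else:
--             width += 2
--     return width
-- ===== SOURCE B (Python) =====
-- def minWidth(arr, height):
--     # Divide and conquer: split the list in halves, combine widths by addition
--     # (width is additive over concatenation).
--     def go(xs):
--         if not xs:
--             return 0
--         if len(xs) == 1:
--             return 1 if xs[0] <= height else 2
--         m = len(xs) // 2
--         return go(xs[:m]) + go(xs[m:])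
--     return go(arr)
-- ===== Notes on version B (the rewrite author's own statement) =====
-- stated objective: alternative
-- what changed: Replaces A's single-pass branching accumulator loop with a recursive divide-and-conquer over halves of the list, combining sub-widths by addition (width is additive over concatenation).
import Mathlib
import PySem

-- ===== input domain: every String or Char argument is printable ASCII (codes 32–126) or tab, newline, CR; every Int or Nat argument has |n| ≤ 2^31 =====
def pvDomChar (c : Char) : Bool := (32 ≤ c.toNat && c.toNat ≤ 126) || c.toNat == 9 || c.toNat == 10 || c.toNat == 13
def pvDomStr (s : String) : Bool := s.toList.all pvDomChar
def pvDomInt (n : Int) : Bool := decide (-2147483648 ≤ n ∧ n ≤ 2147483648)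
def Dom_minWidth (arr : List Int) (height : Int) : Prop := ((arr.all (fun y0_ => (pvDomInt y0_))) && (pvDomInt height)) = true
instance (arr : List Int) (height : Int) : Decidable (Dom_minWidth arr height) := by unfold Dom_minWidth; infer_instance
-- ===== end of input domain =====

-- B replaces A's single-pass branching accumulator with divide-and-conquer over list halves (width is additive over concatenation): an alternative decomposition, not claimed faster.


-- ===== PORT A =====
def minWidth (arr : List Int) (height : Int) : Int :=
  arr.foldl (fun width i => if i ≤ height then width + 1 else width + 2) 0

-- ===== PORT B =====
-- go xs of Source B; xs[:m] / xs[m:] with 0 <= m <= len xs are exactly take/drop, and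
-- len(xs)//2 on a nonnegative length is exactly Nat division. The fuel parameter is
-- only a termination device: it starts at arr.length and never runs out (each half is
-- strictly shorter), so the 0-fuel branch is unreachable (proved in minWidthGoF_closed).
def minWidthGoF (height : Int) : Nat → List Int → Int
  | _, [] => 0
  | _, [a] => if a ≤ height then 1 else 2
  | 0, _ => 0
  | fuel + 1, xs =>
    let m := xs.length / 2
    minWidthGoF height fuel (xs.take m) + minWidthGoF height fuel (xs.drop m)

def minWidth_alt (arr : List Int) (height : Int) : Int :=
  minWidthGoF height arr.length arr

-- ===== PRECONDITION & SPEC =====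
def Spec_minWidth (arr : List Int) (height : Int) (out : Int) : Prop := out = minWidth_alt arr height
instance (arr : List Int) (height : Int) (out : Int) : Decidable (Spec_minWidth arr height out) := by unfold Spec_minWidth; infer_instance

-- ===== CLAIM (what is proved, stated in full; the proofs are below) =====
def Claim_equal_minWidth : Prop := ∀ (arr : List Int) (height : Int), Dom_minWidth arr height → Spec_minWidth arr height (minWidth arr height)

-- ===== LEMMAS AND PROOFS =====
theorem mw_shift (height : Int) (xs : List Int) (w : Int) :
    xs.foldl (fun width i => if i ≤ height then width + 1 else width + 2) w
      = w + xs.foldl (fun width i => if i ≤ height then width + 1 else width + 2) 0 := by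
  induction xs generalizing w with
  | nil => simp
  | cons a t ih =>
    simp only [List.foldl_cons]
    rw [ih, ih (if a ≤ height then (0 : Int) + 1 else (0 : Int) + 2)]
    split_ifs <;> ring

theorem minWidthGoF_eq (height : Int) (fuel : Nat) (xs : List Int)
    (hf : xs.length ≤ fuel + 1) :
    minWidthGoF height fuel xs = minWidth xs height := by
  induction fuel generalizing xs with
  | zero =>
    match xs with
    | [] => rfl
    | [a] => rfl
    | x :: y :: t => simp at hf
  | succ f ih =>
    match xs with
    | [] => rfl
    | [a] => rfl
    | x :: y :: t =>
      have hlen : (x :: y :: t).length = t.length + 2 := by simp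
      rw [minWidthGoF]
      · show minWidthGoF height f ((x :: y :: t).take ((x :: y :: t).length / 2))
            + minWidthGoF height f ((x :: y :: t).drop ((x :: y :: t).length / 2))
            = minWidth (x :: y :: t) height
        rw [ih _ (by rw [List.length_take]; omega),
            ih _ (by rw [List.length_drop]; omega)]
        unfold minWidth
        conv_rhs => rw [← List.take_append_drop ((x :: y :: t).length / 2) (x :: y :: t),
          List.foldl_append, mw_shift]
      · exact fun h => by simp at h
      · exact fun a h => by simp at h

-- ===== VERDICT (by name: the statement is the Claim_ definition above) =====
theorem minWidth_spec : Claim_equal_minWidth := by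
  intro arr height _
  unfold Spec_minWidth minWidth_alt
  exact (minWidthGoF_eq height arr.length arr (Nat.le_succ _)).symm
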